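-- pv_equiv track=rewrite | github.com/XyzHuy/-DL-Fine-tuning-coding-model | data/solution/Solution2838.py | maximumCoins
-- ===== SOURCE A (Python) =====
-- from typing import List
-- from bisect import bisect_right
-- from itertools import accumulate
--
-- def maximumCoins(heroes: List[int], monsters: List[int], coins: List[int]) -> List[int]:
--     # Pair each monster's power with its corresponding coins
--     monster_coin_pairs = list(zip(monsters, coins))
--
--     # Sort the monster-coin pairs by monster power
--     monster_coin_pairs.sort()
--
--     # Extract the sorted monster powers and their cumulative coin sums
--     sorted_monsters = [mc[0] for mc in monster_coin_pairs]
--     cumulative_coins = list(accumulate(mc[1] for mc in monster_coin_pairs))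
--
--     # For each hero, find the maximum coins they can collect
--     result = []
--     for hero in heroes:
--         # Find the position where this hero's power would fit in the sorted monster powers
--         idx = bisect_right(sorted_monsters, hero)
--         # If idx is 0, it means no monster can be defeated by this hero
--         result.append(cumulative_coins[idx - 1] if idx > 0 else 0)
--
--     return result
-- ===== SOURCE B (Python) =====
-- from typing import List
--
-- def maximumCoins(heroes: List[int], monsters: List[int], coins: List[int]) -> List[int]:
--     # Sort monster/coin pairs by power, and heroes (with original index) by power;
--     # sweep both with one pointer and a running coin total, then restore hero order.
--     pairs = sorted(zip(monsters, coins), key=lambda p: p[0])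
--     hs = sorted(zip(heroes, range(len(heroes))), key=lambda p: p[0])
--     out = []
--     total = 0
--     j = 0
--     for h, i in hs:
--         while j < len(pairs) and pairs[j][0] <= h:
--             total += pairs[j][1]
--             j += 1
--         out.append((i, total))
--     out.sort(key=lambda p: p[0])
--     return [t for _, t in out]
-- ===== Notes on version B (the rewrite author's own statement) =====
-- stated objective: alternative
-- what changed: Replaces the prefix-sum table plus per-hero binary search with a two-pointer sweep: heroes are sorted with their original indices and a single monster pointer with a running coin total answers each hero in increasing power order, after which answers are scattered back by index.
import Mathlib
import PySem

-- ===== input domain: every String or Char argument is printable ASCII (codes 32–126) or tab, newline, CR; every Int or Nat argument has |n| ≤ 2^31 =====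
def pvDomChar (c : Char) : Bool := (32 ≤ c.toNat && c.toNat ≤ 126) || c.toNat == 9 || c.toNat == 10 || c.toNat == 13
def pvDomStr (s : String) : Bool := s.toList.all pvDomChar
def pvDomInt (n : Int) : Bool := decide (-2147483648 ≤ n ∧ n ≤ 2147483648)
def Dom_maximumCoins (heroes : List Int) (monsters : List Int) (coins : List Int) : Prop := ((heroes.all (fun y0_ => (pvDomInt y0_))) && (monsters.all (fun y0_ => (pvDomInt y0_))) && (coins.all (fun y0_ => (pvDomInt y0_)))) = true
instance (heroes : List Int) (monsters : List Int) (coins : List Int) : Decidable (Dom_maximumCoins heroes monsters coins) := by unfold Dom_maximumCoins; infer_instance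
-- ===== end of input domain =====

-- B replaces A's prefix-sum table + per-hero binary search by a two-pointer sweep over
-- heroes sorted with their original indices; same return value, stated as Claim_equal_.

-- ===== PORT A =====
-- itertools.accumulate (running sums), transliterated
def pyAccumulateAux (acc : Int) : List Int → List Int
  | [] => []
  | x :: xs => (acc + x) :: pyAccumulateAux (acc + x) xs

def pyAccumulate (l : List Int) : List Int := pyAccumulateAux 0 l

def maximumCoins (heroes : List Int) (monsters : List Int) (coins : List Int) : List Int :=
  -- monster_coin_pairs = sorted(zip(monsters, coins))  (tuple order)
  let monsterCoinPairs := PySem.List.sorted2 (monsters.zip coins) (fun p => p.1) (fun p => p.2)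
  let sortedMonsters := monsterCoinPairs.map (fun p => p.1)
  let cumulativeCoins := pyAccumulate (monsterCoinPairs.map (fun p => p.2))
  heroes.map (fun hero =>
    let idx := PySem.List.bisectRight sortedMonsters hero
    if 0 < idx then PySem.List.pyGetD cumulativeCoins ((idx : Int) - 1) 0 else 0)

-- ===== PORT B =====
-- the inner 'while j < len(pairs) and pairs[j][0] <= h' loop, over the remaining suffix
def consumeB : List (Int × Int) → Int → Int → (List (Int × Int)) × Int
  | [], _, total => ([], total)
  | (m, c) :: rest, h, total =>
      if m ≤ h then consumeB rest h (total + c) else ((m, c) :: rest, total)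

-- the 'for h, i in hs' loop producing the (index, total) pairs
def goB : List (Int × Int) → List (Int × Int) → Int → List (Int × Int)
  | [], _, _ => []
  | (h, i) :: hs, rest, total =>
      let s := consumeB rest h total
      (i, s.2) :: goB hs s.1 s.2

def maximumCoins_alt (heroes : List Int) (monsters : List Int) (coins : List Int) : List Int :=
  let pairs := PySem.List.sorted (monsters.zip coins) (fun p => p.1)
  let hs := PySem.List.sorted (heroes.zip (PySem.List.pyRange 0 heroes.length 1)) (fun p => p.1)
  let out := goB hs pairs 0
  (PySem.List.sorted out (fun p => p.1)).map (fun p => p.2)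

-- ===== PRECONDITION & SPEC =====
def Spec_maximumCoins (heroes : List Int) (monsters : List Int) (coins : List Int) (out : List Int) : Prop := out = maximumCoins_alt heroes monsters coins
instance (heroes : List Int) (monsters : List Int) (coins : List Int) (out : List Int) : Decidable (Spec_maximumCoins heroes monsters coins out) := by unfold Spec_maximumCoins; infer_instance

-- ===== CLAIM (what is proved, stated in full; the proofs are below) =====
def Claim_equal_maximumCoins : Prop := ∀ (heroes : List Int) (monsters : List Int) (coins : List Int), Dom_maximumCoins heroes monsters coins → Spec_maximumCoins heroes monsters coins (maximumCoins heroes monsters coins)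

-- ===== LEMMAS AND PROOFS =====

-- total coins of the monsters (in l) a hero of power h can defeat
def sumLE (l : List (Int × Int)) (h : Int) : Int :=
  ((l.filter (fun p => p.1 ≤ h)).map (fun p => p.2)).sum

lemma sumLE_perm {l l' : List (Int × Int)} (hp : l.Perm l') (h : Int) :
    sumLE l h = sumLE l' h := by
  unfold sumLE
  exact List.Perm.sum_eq (List.Perm.map _ (List.Perm.filter _ hp))

-- insertBy into a P-sorted list stays P-sorted (P the non-strict companion of `before`)
lemma pairwise_insertBy {α : Type} (before : α → α → Bool) (P : α → α → Prop)
    (htrans : ∀ a b c, P a b → P b c → P a c)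
    (h1 : ∀ a b, before a b = true → P a b)
    (h2 : ∀ a b, before a b = false → P b a)
    (x : α) : ∀ l : List α, l.Pairwise P → (PySem.List.insertBy before x l).Pairwise P := by
  intro l
  induction l with
  | nil => intro _; simp [PySem.List.insertBy]
  | cons y ys ih =>
    intro hl
    rw [List.pairwise_cons] at hl
    by_cases hb : before x y = true
    · simp only [PySem.List.insertBy, hb, if_true]
      refine List.Pairwise.cons ?_ (List.Pairwise.cons hl.1 hl.2)
      intro z hz
      rcases List.mem_cons.mp hz with rfl | hz
      · exact h1 _ _ hb
      · exact htrans _ _ _ (h1 _ _ hb) (hl.1 z hz)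
    · simp only [PySem.List.insertBy, hb, if_false]
      refine List.Pairwise.cons ?_ (ih hl.2)
      intro z hz
      rcases (PySem.List.mem_insertBy before x z ys).mp hz with rfl | hz
      · exact h2 _ _ (by simpa using hb)
      · exact hl.1 z hz

lemma pairwise_foldl_insertBy {α : Type} (before : α → α → Bool) (P : α → α → Prop)
    (htrans : ∀ a b c, P a b → P b c → P a c)
    (h1 : ∀ a b, before a b = true → P a b)
    (h2 : ∀ a b, before a b = false → P b a) :
    ∀ (xs acc : List α), acc.Pairwise P →
      (xs.foldl (fun acc x => PySem.List.insertBy before x acc) acc).Pairwise P := by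
  intro xs
  induction xs with
  | nil => intro acc h; simpa using h
  | cons x t ih =>
    intro acc h
    simpa using ih _ (pairwise_insertBy before P htrans h1 h2 x acc h)

-- sorted2 by (fst, snd) is sorted by fst
lemma sorted2_pairwise_fst (xs : List (Int × Int)) :
    (PySem.List.sorted2 xs (fun p => p.1) (fun p => p.2)).Pairwise
      (fun a b => a.1 ≤ b.1) := by
  show (List.foldl _ [] xs).Pairwise _
  apply pairwise_foldl_insertBy _ _ ?_ ?_ ?_ xs [] (by simp)
  · exact fun a b c hab hbc => le_trans hab hbc
  · intro a b hab
    by_cases h : a.1 < b.1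
    · omega
    · simp [h] at hab
      omega
  · intro a b hab
    simp at hab
    omega

lemma length_pyAccumulateAux (l : List Int) : ∀ acc, (pyAccumulateAux acc l).length = l.length := by
  induction l with
  | nil => intro acc; rfl
  | cons x xs ih => intro acc; simp [pyAccumulateAux, ih]

lemma getElem_pyAccumulateAux (l : List Int) : ∀ acc (j : Nat) (hj : j < l.length),
    (pyAccumulateAux acc l)[j]'(by rw [length_pyAccumulateAux]; exact hj)
      = acc + (l.take (j + 1)).sum := by
  induction l with
  | nil => intro acc j hj; simp at hj
  | cons x xs ih =>
    intro acc j hj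
    cases j with
    | zero => simp [pyAccumulateAux]
    | succ k =>
      have hk : k < xs.length := by simpa using hj
      simp only [pyAccumulateAux, List.getElem_cons_succ, List.take_succ_cons, List.sum_cons]
      rw [ih (acc + x) k hk]
      ring

-- a predicate true exactly on indices below k picks out the k-prefix
lemma filter_eq_take_of_split {α : Type} (p : α → Bool) :
    ∀ (l : List α) (k : Nat), k ≤ l.length →
    (∀ j (hj : j < l.length), j < k → p l[j] = true) →
    (∀ j (hj : j < l.length), k ≤ j → p l[j] = false) →
    l.filter p = l.take k := by
  intro l
  induction l with
  | nil => intro k _ _ _; simp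
  | cons x t ih =>
    intro k hk h1 h2
    cases k with
    | zero =>
      have hnil : List.filter p (x :: t) = [] := by
        refine List.filter_eq_nil_iff.mpr ?_
        intro a ha
        rcases List.mem_iff_getElem.mp ha with ⟨j, hj, rfl⟩
        simp [h2 j hj (Nat.zero_le _)]
      simp [hnil]
    | succ m =>
      have hx : p x = true := h1 0 (by simp) (Nat.succ_pos _)
      simp only [List.filter_cons, hx, if_true, List.take_succ_cons]
      congr 1
      refine ih m (by simpa using hk) ?_ ?_
      · intro j hj hjm
        have := h1 (j + 1) (by simpa using hj) (by omega)
        simpa using this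
      · intro j hj hjm
        have := h2 (j + 1) (by simpa using hj) (by omega)
        simpa using this

-- ===== A-side characterisation =====
lemma maximumCoins_eq_map (heroes monsters coins : List Int) :
    maximumCoins heroes monsters coins
      = heroes.map (fun h => sumLE (monsters.zip coins) h) := by
  unfold maximumCoins
  refine List.map_congr_left ?_
  intro h _
  have hperm := PySem.List.sorted2_perm (monsters.zip coins) (fun p => p.1) (fun p => p.2) false
  set ps := PySem.List.sorted2 (monsters.zip coins) (fun p => p.1) (fun p => p.2) with hps
  have hpair : ps.Pairwise (fun a b => a.1 ≤ b.1) := sorted2_pairwise_fst _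
  have hsm : (ps.map (fun p => p.1)).Pairwise (fun a b => a ≤ b) :=
    List.pairwise_map.mpr hpair
  obtain ⟨hk, hlt, hge⟩ := PySem.List.bisectRight_spec (ps.map (fun p => p.1)) h hsm
  set idx := PySem.List.bisectRight (ps.map (fun p => p.1)) h with hidx
  have hlen : (ps.map (fun p => p.1)).length = ps.length := List.length_map ..
  rw [hlen] at hk
  -- the hero's filtered sum is the idx-prefix of the sorted pairs
  have hfil : ps.filter (fun p => p.1 ≤ h) = ps.take idx := by
    refine filter_eq_take_of_split _ ps idx hk ?_ ?_
    · intro j hj hjk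
      have := hlt j (by simpa [hlen] using hj) hjk
      simpa using this
    · intro j hj hjk
      have := hge j (by simpa [hlen] using hj) hjk
      simp only [List.getElem_map] at this
      simpa using this
  have hsum : sumLE (monsters.zip coins) h = ((ps.map (fun p => p.2)).take idx).sum := by
    rw [sumLE_perm hperm.symm h]
    unfold sumLE
    rw [hfil, List.map_take]
  rw [hsum]
  by_cases hpos : 0 < idx
  · simp only [hpos, if_true]
    have hlc : (pyAccumulate (ps.map (fun p => p.2))).length = ps.length := by
      unfold pyAccumulate; rw [length_pyAccumulateAux, List.length_map]
    have hcast : ((idx : Int) - 1) = ((idx - 1 : Nat) : Int) := by omega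
    rw [hcast, PySem.List.pyGetD_natCast]
    rw [List.getD_eq_getElem _ _ (by omega : idx - 1 < (pyAccumulate (ps.map (fun p => p.2))).length)]
    unfold pyAccumulate
    rw [getElem_pyAccumulateAux (ps.map (fun p => p.2)) 0 (idx - 1)
      (by rw [List.length_map]; omega)]
    have : idx - 1 + 1 = idx := by omega
    rw [this]
    ring
  · have h0 : idx = 0 := by omega
    simp [hpos, h0]

-- ===== B-side lemmas =====
lemma consumeB_spec : ∀ (rest : List (Int × Int)) (h total : Int),
    rest.Pairwise (fun a b => a.1 ≤ b.1) →
    consumeB rest h total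
      = (rest.filter (fun p => !(p.1 ≤ h)), total + sumLE rest h) := by
  intro rest
  induction rest with
  | nil => intro h total _; simp [consumeB, sumLE]
  | cons p t ih =>
    intro h total hpw
    rw [List.pairwise_cons] at hpw
    obtain ⟨m, c⟩ := p
    by_cases hm : m ≤ h
    · rw [show consumeB ((m, c) :: t) h total = consumeB t h (total + c) from by
        simp [consumeB, hm]]
      rw [ih h (total + c) hpw.2]
      simp only [sumLE, List.filter_cons]
      simp [hm, add_assoc]
    · have hall : ∀ q ∈ t, ¬ q.1 ≤ h := by
        intro q hq hqh
        exact hm (le_trans (hpw.1 q hq) hqh)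
      have hfil : List.filter (fun p => !(p.1 ≤ h)) ((m, c) :: t) = (m, c) :: t := by
        refine List.filter_eq_self.mpr ?_
        intro a ha
        rcases List.mem_cons.mp ha with rfl | ha
        · simp [hm]
        · simp [hall a ha]
      have hsum : sumLE ((m, c) :: t) h = 0 := by
        unfold sumLE
        have : List.filter (fun p => p.1 ≤ h) ((m, c) :: t) = [] := by
          refine List.filter_eq_nil_iff.mpr ?_
          intro a ha
          rcases List.mem_cons.mp ha with rfl | ha
          · simp [hm]
          · simp [hall a ha]
        simp [this]
      rw [show consumeB ((m, c) :: t) h total = ((m, c) :: t, total) from by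
        simp [consumeB, hm]]
      rw [hfil, hsum]
      simp

lemma sumLE_cons (p : Int × Int) (l : List (Int × Int)) (h : Int) :
    sumLE (p :: l) h = (if p.1 ≤ h then p.2 else 0) + sumLE l h := by
  by_cases hp : p.1 ≤ h
  · simp [sumLE, List.filter_cons, hp]
  · simp [sumLE, List.filter_cons, hp]

lemma sumLE_split (l : List (Int × Int)) (h h' : Int) (hh : h ≤ h') :
    sumLE l h' = sumLE l h + sumLE (l.filter (fun p => !(p.1 ≤ h))) h' := by
  induction l with
  | nil => simp [sumLE]
  | cons p t ih =>
    rw [List.filter_cons]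
    by_cases h1 : p.1 ≤ h
    · rw [if_neg (by simp [h1])]
      have h2 : p.1 ≤ h' := le_trans h1 hh
      rw [sumLE_cons, sumLE_cons, if_pos h1, if_pos h2, ih]
      ring
    · rw [if_pos (by simp [h1])]
      rw [sumLE_cons, sumLE_cons, sumLE_cons, if_neg h1, ih]
      ring

lemma goB_spec : ∀ (hs rest : List (Int × Int)) (total : Int),
    hs.Pairwise (fun a b => a.1 ≤ b.1) →
    rest.Pairwise (fun a b => a.1 ≤ b.1) →
    goB hs rest total
      = hs.map (fun q => (q.2, total + sumLE rest q.1)) := by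
  intro hs
  induction hs with
  | nil => intro rest total _ _; simp [goB]
  | cons p t ih =>
    intro rest total hpw hrw
    rw [List.pairwise_cons] at hpw
    obtain ⟨h, i⟩ := p
    rw [show goB ((h, i) :: t) rest total
        = (i, (consumeB rest h total).2)
          :: goB t (consumeB rest h total).1 (consumeB rest h total).2 from rfl]
    rw [consumeB_spec rest h total hrw]
    have hrw' : (rest.filter (fun p => !(p.1 ≤ h))).Pairwise (fun a b => a.1 ≤ b.1) :=
      hrw.filter _
    rw [ih _ _ hpw.2 hrw']
    simp only [List.map_cons]
    congr 1
    refine List.map_congr_left ?_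
    intro q hq
    have hle : h ≤ q.1 := hpw.1 q hq
    rw [sumLE_split rest h q.1 hle]
    simp [add_assoc]

lemma maximumCoins_alt_eq_map (heroes monsters coins : List Int) :
    maximumCoins_alt heroes monsters coins
      = heroes.map (fun h => sumLE (monsters.zip coins) h) := by
  unfold maximumCoins_alt
  dsimp only
  have hplen : (PySem.List.pyRange 0 (heroes.length : Int) 1).length = heroes.length := by
    rw [PySem.List.length_pyRange_one]; omega
  set r := PySem.List.pyRange 0 (heroes.length : Int) 1 with hr
  set hz := heroes.zip r with hhz
  set pairs := PySem.List.sorted (monsters.zip coins) (fun p => p.1) with hpairs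
  have hpw : pairs.Pairwise (fun a b => a.1 ≤ b.1) :=
    PySem.List.sorted_pairwise (monsters.zip coins) (fun p => p.1)
  set hs := PySem.List.sorted hz (fun p => p.1) with hhs
  have hspw : hs.Pairwise (fun a b => a.1 ≤ b.1) :=
    PySem.List.sorted_pairwise hz (fun p => p.1)
  rw [goB_spec hs pairs 0 hspw hpw]
  have hps : ∀ x, sumLE pairs x = sumLE (monsters.zip coins) x := fun x =>
    sumLE_perm (PySem.List.sorted_perm (monsters.zip coins) (fun p => p.1) false) x
  set g : Int × Int → Int × Int := fun q => (q.2, sumLE (monsters.zip coins) q.1) with hg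
  have hmapg : hs.map (fun q => (q.2, 0 + sumLE pairs q.1)) = hs.map g := by
    refine List.map_congr_left ?_
    intro q _
    simp only [hg, zero_add, hps q.1]
  rw [hmapg]
  have hperm : (hz.map g).Perm (hs.map g) :=
    ((PySem.List.sorted_perm hz (fun p => p.1) false).map g).symm
  have hsndzip : hz.map (fun q => q.2) = r := by
    rw [hhz]
    exact List.map_snd_zip (by omega)
  have hfstzip : hz.map (fun q => q.1) = heroes := by
    rw [hhz]
    exact List.map_fst_zip (by omega)
  have hzpw : hz.Pairwise (fun a b => a.2 < b.2) := by
    refine List.pairwise_map.mp ?_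
    rw [show hz.map (fun q => q.2) = r from hsndzip]
    exact PySem.List.pairwise_lt_pyRange_one 0 (heroes.length : Int)
  have hyspw : (hz.map g).Pairwise (fun a b => a.1 < b.1) := by
    refine List.pairwise_map.mpr ?_
    exact hzpw.imp (fun {a b} hab => by simpa [hg] using hab)
  rw [PySem.List.sorted_eq_of_perm_of_pairwise_lt (hs.map g) (hz.map g) (fun p => p.1)
    hperm hyspw]
  rw [List.map_map]
  have : (fun p => p.2) ∘ g = fun q => sumLE (monsters.zip coins) q.1 := rfl
  rw [this]
  calc hz.map (fun q => sumLE (monsters.zip coins) q.1)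
      = (hz.map (fun q => q.1)).map (fun h => sumLE (monsters.zip coins) h) := by
        rw [List.map_map]; rfl
    _ = heroes.map (fun h => sumLE (monsters.zip coins) h) := by rw [hfstzip]

-- ===== VERDICT (by name: the statement is the Claim_ definition above) =====
theorem maximumCoins_spec : Claim_equal_maximumCoins := by
  intro heroes monsters coins _
  show _ = _
  rw [maximumCoins_eq_map, maximumCoins_alt_eq_map]
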